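-- pv_equiv track=rewrite | github.com/nowqtt/NowqttGatewayHomeassistantAddon | NowqttGateway/src/gateway/serial_task.py | calculate_hop_count_to_and_from
-- ===== SOURCE A (Python) =====
-- def calculate_hop_count_to_and_from(mac_address, trace_message, byte_chars_per_hop):
--     counter = 0
--     count_to = -1 #GW is in the trace but not a hop -> start from -1
--     count_from = -1 #GW is in the trace but not a hop -> start from -1
--
--     reached_destination = False
--     while counter * byte_chars_per_hop < len(trace_message):
--         if not reached_destination:
--             if trace_message[counter * byte_chars_per_hop: counter * byte_chars_per_hop + 12] != mac_address:
--                 count_to += 1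
--             else:
--                 reached_destination = True
--         else:
--             count_from += 1
--
--         counter += 1
--
--     return f'{count_to}/{count_from}'
-- ===== SOURCE B (Python) =====
-- def calculate_hop_count_to_and_from(mac_address, trace_message, byte_chars_per_hop):
--     n = len(trace_message)
--     if n == 0:
--         return '-1/-1'
--     total = -(-n // byte_chars_per_hop)  # ceil(n / byte_chars_per_hop): number of hop chunks
--     dest = next((i for i in range(total)
--                  if trace_message[i * byte_chars_per_hop: i * byte_chars_per_hop + 12] == mac_address),
--                 None)
--     if dest is None:
--         return f'{total - 1}/-1'
--     return f'{dest - 1}/{total - dest - 2}'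
-- ===== Notes on version B (the rewrite author's own statement) =====
-- stated objective: alternative
-- what changed: Replaces the stateful while-loop (reached_destination flag, two running counters) by finding the first matching chunk index and computing both counts with closed-form ceil-division arithmetic; Pre_ excludes byte_chars_per_hop <= 0 with a nonempty trace, where A loops forever.
import Mathlib
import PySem

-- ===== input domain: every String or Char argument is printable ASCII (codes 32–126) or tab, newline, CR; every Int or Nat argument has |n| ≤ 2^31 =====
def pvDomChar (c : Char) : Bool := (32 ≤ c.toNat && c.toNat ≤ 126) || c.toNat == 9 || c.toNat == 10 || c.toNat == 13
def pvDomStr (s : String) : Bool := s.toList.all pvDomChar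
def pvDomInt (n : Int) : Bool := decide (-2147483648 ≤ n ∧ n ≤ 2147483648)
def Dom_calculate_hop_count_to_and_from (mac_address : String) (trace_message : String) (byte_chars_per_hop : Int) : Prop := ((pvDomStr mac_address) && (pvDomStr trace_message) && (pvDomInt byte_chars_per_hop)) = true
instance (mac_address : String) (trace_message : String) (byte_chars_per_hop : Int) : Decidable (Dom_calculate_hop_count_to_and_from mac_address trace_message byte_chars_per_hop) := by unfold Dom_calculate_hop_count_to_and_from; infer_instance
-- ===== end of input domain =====

-- B replaces A's stateful while-loop by a first-match chunk scan plus closed-form ceil arithmetic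
-- (no speed claim); Pre_ excludes byte_chars_per_hop ≤ 0 with a nonempty trace, where A never returns.


-- f'{ct}/{cf}' (both Pythons format their result this way)
def pvFmt (ct cf : Int) : String := PySem.Int.toStr ct ++ "/" ++ PySem.Int.toStr cf

-- ===== PORT A =====
-- A's while loop, step for step; fuel only makes the recursion total (under Pre_ the
-- loop runs at most trace length many times, so the fuel is never exhausted).
def pvLoopA (mac tm : List Char) (bch : Int) : Nat → Int → Int → Int → Bool → String
  | 0, _, ct, cf, _ => pvFmt ct cf
  | f + 1, c, ct, cf, reached =>
    if c * bch < (tm.length : Int) then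
      if !reached then
        if PySem.List.slice tm (some (c * bch)) (some (c * bch + 12)) ≠ mac then
          pvLoopA mac tm bch f (c + 1) (ct + 1) cf reached
        else
          pvLoopA mac tm bch f (c + 1) ct cf true
      else
        pvLoopA mac tm bch f (c + 1) ct (cf + 1) reached
    else pvFmt ct cf

def calculate_hop_count_to_and_from (mac_address : String) (trace_message : String) (byte_chars_per_hop : Int) : String :=
  pvLoopA mac_address.toList trace_message.toList byte_chars_per_hop
    (trace_message.toList.length + 1) 0 (-1) (-1) false

-- ===== PORT B =====
-- next((i for i in range(total) if trace[i*b : i*b+12] == mac), None)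
def pvFirstChunk? (mac tm : List Char) (bch total : Int) : Option Int :=
  (PySem.List.pyRange 0 total 1).find?
    (fun i => PySem.List.slice tm (some (i * bch)) (some (i * bch + 12)) == mac)

def calculate_hop_count_to_and_from_alt (mac_address : String) (trace_message : String) (byte_chars_per_hop : Int) : String :=
  let t := trace_message.toList
  let n : Int := t.length
  if n = 0 then pvFmt (-1) (-1)  -- the literal '-1/-1'
  else
    let total : Int := -(PySem.Int.floordiv (-n) byte_chars_per_hop)
    match pvFirstChunk? mac_address.toList t byte_chars_per_hop total with
    | none => pvFmt (total - 1) (-1)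
    | some d => pvFmt (d - 1) (total - d - 2)

-- ===== PRECONDITION & SPEC =====
-- On a nonempty trace with byte_chars_per_hop ≤ 0 the Python A loops forever (never returns),
-- so exactly those inputs are excluded; Pre_ admits every input on which A returns.
def Pre_calculate_hop_count_to_and_from (mac_address : String) (trace_message : String) (byte_chars_per_hop : Int) : Prop :=
  trace_message = "" ∨ 0 < byte_chars_per_hop
instance (mac_address : String) (trace_message : String) (byte_chars_per_hop : Int) : Decidable (Pre_calculate_hop_count_to_and_from mac_address trace_message byte_chars_per_hop) := by unfold Pre_calculate_hop_count_to_and_from; infer_instance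

def pvWitness_calculate_hop_count_to_and_from : String × String × Int := ("ab", "xyab", 2)

def Spec_calculate_hop_count_to_and_from (mac_address : String) (trace_message : String) (byte_chars_per_hop : Int) (out : String) : Prop := out = calculate_hop_count_to_and_from_alt mac_address trace_message byte_chars_per_hop
instance (mac_address : String) (trace_message : String) (byte_chars_per_hop : Int) (out : String) : Decidable (Spec_calculate_hop_count_to_and_from mac_address trace_message byte_chars_per_hop out) := by unfold Spec_calculate_hop_count_to_and_from; infer_instance

-- ===== CLAIM (what is proved, stated in full; the proofs are below) =====
def Claim_equal_calculate_hop_count_to_and_from : Prop := ∀ (mac_address : String) (trace_message : String) (byte_chars_per_hop : Int), Dom_calculate_hop_count_to_and_from mac_address trace_message byte_chars_per_hop → Pre_calculate_hop_count_to_and_from mac_address trace_message byte_chars_per_hop → Spec_calculate_hop_count_to_and_from mac_address trace_message byte_chars_per_hop (calculate_hop_count_to_and_from mac_address trace_message byte_chars_per_hop)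

-- ===== LEMMAS AND PROOFS =====

-- c * b < n  ↔  c < T, given the ceil-division brackets (T-1)*b < n ≤ T*b and 0 < b
lemma pv_lt_iff {b n T : Int} (hb : 0 < b) (h1 : (T - 1) * b < n) (h2 : n ≤ T * b)
    (c : Int) : c * b < n ↔ c < T := by
  constructor
  · intro h
    by_contra hc
    have hc' : T ≤ c := by omega
    have : T * b ≤ c * b := mul_le_mul_of_nonneg_right hc' hb.le
    omega
  · intro h
    have hc : c ≤ T - 1 := by omega
    have : c * b ≤ (T - 1) * b := mul_le_mul_of_nonneg_right hc hb.le
    omega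

-- after the destination is reached, each remaining chunk just increments count_from
lemma pvLoopA_reached (mac tm : List Char) {b n T : Int} (hn : n = (tm.length : Int))
    (hb : 0 < b) (h1 : (T - 1) * b < n) (h2 : n ≤ T * b) :
    ∀ (f : Nat) (c ct cf : Int), c ≤ T → T ≤ c + f →
      pvLoopA mac tm b f c ct cf true = pvFmt ct (cf + (T - c)) := by
  intro f
  induction f with
  | zero =>
    intro c ct cf hc hf
    have hcT : c = T := by omega
    rw [pvLoopA, hcT]
    congr 1; omega
  | succ f ih =>
    intro c ct cf hc hf
    rw [pvLoopA]
    by_cases h : c * b < (tm.length : Int)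
    · have hcT : c < T := by rw [← hn, pv_lt_iff hb h1 h2] at h; exact h
      rw [if_pos h, if_neg (by decide : ¬ ((!true) = true))]
      rw [ih (c + 1) ct (cf + 1) (by omega) (by push_cast at hf ⊢; omega)]
      congr 1; omega
    · have hcT : c = T := by
        rw [← hn, pv_lt_iff hb h1 h2] at h; omega
      rw [if_neg h, hcT]
      congr 1; omega

-- before the destination is reached, the loop is the first-match scan over the remaining chunks
lemma pvLoopA_scan (mac tm : List Char) {b n T : Int} (hn : n = (tm.length : Int))
    (hb : 0 < b) (h1 : (T - 1) * b < n) (h2 : n ≤ T * b) :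
    ∀ (f : Nat) (c ct cf : Int), c ≤ T → T ≤ c + f →
      pvLoopA mac tm b f c ct cf false =
        match (PySem.List.pyRange c T 1).find?
            (fun i => PySem.List.slice tm (some (i * b)) (some (i * b + 12)) == mac) with
        | none => pvFmt (ct + (T - c)) cf
        | some d => pvFmt (ct + (d - c)) (cf + (T - d - 1)) := by
  intro f
  induction f with
  | zero =>
    intro c ct cf hc hf
    have hcT : c = T := by omega
    rw [pvLoopA, hcT, PySem.List.pyRange_one_eq_nil (le_refl T)]
    simp only [List.find?_nil]
    congr 1; omega
  | succ f ih =>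
    intro c ct cf hc hf
    rw [pvLoopA]
    by_cases h : c * b < (tm.length : Int)
    · have hcT : c < T := by rw [← hn, pv_lt_iff hb h1 h2] at h; exact h
      rw [if_pos h, if_pos (by decide : (!false) = true)]
      rw [PySem.List.pyRange_one_cons hcT]
      by_cases hm : PySem.List.slice tm (some (c * b)) (some (c * b + 12)) = mac
      · rw [if_neg (not_not_intro hm),
            List.find?_cons_of_pos (by simp [hm]),
            pvLoopA_reached mac tm hn hb h1 h2 f (c + 1) ct cf (by omega)
              (by push_cast at hf ⊢; omega)]
        simp only []
        congr 1 <;> omega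
      · rw [if_pos hm,
            List.find?_cons_of_neg (by simp [hm]),
            ih (c + 1) (ct + 1) cf (by omega) (by push_cast at hf ⊢; omega)]
        cases hfind : (PySem.List.pyRange (c + 1) T 1).find?
            (fun i => PySem.List.slice tm (some (i * b)) (some (i * b + 12)) == mac) with
        | none => simp only; congr 1; omega
        | some d => simp only; congr 1 <;> omega
    · have hcT : c = T := by
        rw [← hn, pv_lt_iff hb h1 h2] at h; omega
      rw [if_neg h, hcT, PySem.List.pyRange_one_eq_nil (le_refl T)]
      simp only [List.find?_nil]
      congr 1; omega

-- ===== VERDICT (by name: the statement is the Claim_ definition above) =====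
theorem calculate_hop_count_to_and_from_spec : Claim_equal_calculate_hop_count_to_and_from := by
  intro mac tm b _ hpre
  unfold Spec_calculate_hop_count_to_and_from
  unfold calculate_hop_count_to_and_from calculate_hop_count_to_and_from_alt
  simp only []
  by_cases h0 : (tm.toList.length : Int) = 0
  · rw [if_pos h0]
    have hl : tm.toList.length = 0 := by omega
    rw [hl]
    rw [pvLoopA, if_neg (by rw [hl]; simp)]
  · rw [if_neg h0]
    have hb : 0 < b := by
      rcases hpre with he | hb
      · exfalso; apply h0; rw [he]; simp
      · exact hb
    have hnpos : 0 < (tm.toList.length : Int) := by positivity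
    have hnpos' : (0:Int) < (tm.toList.length : Int) := by omega
    set n : Int := (tm.toList.length : Int) with hnn
    set T : Int := -(PySem.Int.floordiv (-n) b) with hT
    have hbr : (T - 1) * b < n ∧ n ≤ T * b :=
      (PySem.Int.neg_floordiv_neg_eq_iff_of_pos hb).mp hT.symm
    have hT1 : 1 ≤ T := by
      by_contra hc
      have : T * b ≤ 0 := mul_nonpos_of_nonpos_of_nonneg (by omega) hb.le
      omega
    have hTn : T ≤ n := by
      have h1b : (T - 1) * 1 ≤ (T - 1) * b :=
        mul_le_mul_of_nonneg_left (by omega) (by omega)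
      omega
    rw [pvLoopA_scan mac.toList tm.toList hnn hb hbr.1 hbr.2
          (tm.toList.length + 1) 0 (-1) (-1) (by omega) (by push_cast; omega)]
    unfold pvFirstChunk?
    cases hfind : (PySem.List.pyRange 0 T 1).find?
        (fun i => PySem.List.slice tm.toList (some (i * b)) (some (i * b + 12)) == mac.toList) with
    | none => simp only; congr 1; omega
    | some d => simp only; congr 1 <;> omega
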